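-- pv_equiv track=rewrite | github.com/giusMaffi/scicon-rag-bot | backend/advisor/scicon_advisor.py | resolve_model_key
-- ===== SOURCE A (Python) =====
-- from typing import Optional, Dict, Any, List, Tuple
--
-- ISSUE_SYNONYMS: Dict[str, str] = {
--     "lente": "lente-ricambio",
--     "vetro": "lente-ricambio",
--     "lenti": "lente-ricambio",
--     "lens": "lente-ricambio",
--
--     "nasello": "nasello",
--     "nose": "nasello",
--     "nosepad": "nasello",
--
--     "terminali": "terminali",
--     "terminal": "terminali",
--     "tips": "terminali",
--
--     "kit-clip": "kit-clip",
--     "clip": "kit-clip",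
--     "clip-in": "kit-clip",
--     "inserto": "kit-clip",
-- }
--
-- def canonicalize_issue(issue: Optional[str]) -> Optional[str]:
--     if not issue:
--         return None
--     i = issue.strip().lower()
--     return ISSUE_SYNONYMS.get(i, i)
--
-- SpareDB = Dict[str, Dict[str, List[str]]]
--
-- def resolve_model_key(model: str, db: SpareDB, issue: Optional[str] = None) -> Optional[str]:
--     if not model or not db:
--         return None
--
--     if model in db:
--         return model
--
--     m_low = model.strip().lower()
--
--     for k in db.keys():
--         if k.strip().lower() == m_low:
--             return k
--
--     candidates = [k for k in db.keys() if k.strip().lower().startswith(m_low)]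
--     if not candidates:
--         return None
--
--     if issue:
--         issue_key = canonicalize_issue(issue.strip().lower()) or issue.strip().lower()
--         issue_matches = [c for c in candidates if issue_key in (db.get(c) or {})]
--         if len(issue_matches) == 1:
--             return issue_matches[0]
--         if len(issue_matches) > 1:
--             issue_matches.sort(key=len)
--             return issue_matches[0]
--
--     candidates.sort(key=len)
--     return candidates[0]
-- ===== SOURCE B (Python) =====
-- ISSUE_SYNONYMS = {
--     "lente": "lente-ricambio",
--     "vetro": "lente-ricambio",
--     "lenti": "lente-ricambio",
--     "lens": "lente-ricambio",
--     "nasello": "nasello",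
--     "nose": "nasello",
--     "nosepad": "nasello",
--     "terminali": "terminali",
--     "terminal": "terminali",
--     "tips": "terminali",
--     "kit-clip": "kit-clip",
--     "clip": "kit-clip",
--     "clip-in": "kit-clip",
--     "inserto": "kit-clip",
-- }
--
-- def canonicalize_issue(issue):
--     if not issue:
--         return None
--     i = issue.strip().lower()
--     return ISSUE_SYNONYMS.get(i, i)
--
-- def resolve_model_key(model, db, issue=None):
--     if not model or not db:
--         return None
--     if model in db:
--         return model
--     m_low = model.strip().lower()
--
--     # one-time normalized-key index (first occurrence wins): exact lookup, no scan
--     norm_index = {}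
--     for k in db:
--         kn = k.strip().lower()
--         if kn not in norm_index:
--             norm_index[kn] = k
--     if m_low in norm_index:
--         return norm_index[m_low]
--
--     issue_key = None
--     if issue:
--         issue_key = canonicalize_issue(issue.strip().lower()) or issue.strip().lower()
--
--     # streaming argmin over prefix matches: two running bests, no lists, no sort
--     best = None
--     best_issue = None
--     for k in db:
--         if not k.strip().lower().startswith(m_low):
--             continue
--         if best is None or len(k) < len(best):
--             best = k
--         if issue_key is not None and issue_key in db[k]:
--             if best_issue is None or len(k) < len(best_issue):
--                 best_issue = k
--     if best_issue is not None:
--         return best_issue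
--     return best
-- ===== Notes on version B (the rewrite author's own statement) =====
-- stated objective: alternative
-- what changed: A's four staged passes (exact scan, prefix-list comprehension, issue filter, sort[0]) are replaced by a one-time normalized-key index dict (first occurrence wins) for the case-insensitive exact lookup and a single streaming pass that keeps two running first-shortest bests (prefix best and issue-filtered best) with no candidate lists and no sorting.
import Mathlib
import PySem

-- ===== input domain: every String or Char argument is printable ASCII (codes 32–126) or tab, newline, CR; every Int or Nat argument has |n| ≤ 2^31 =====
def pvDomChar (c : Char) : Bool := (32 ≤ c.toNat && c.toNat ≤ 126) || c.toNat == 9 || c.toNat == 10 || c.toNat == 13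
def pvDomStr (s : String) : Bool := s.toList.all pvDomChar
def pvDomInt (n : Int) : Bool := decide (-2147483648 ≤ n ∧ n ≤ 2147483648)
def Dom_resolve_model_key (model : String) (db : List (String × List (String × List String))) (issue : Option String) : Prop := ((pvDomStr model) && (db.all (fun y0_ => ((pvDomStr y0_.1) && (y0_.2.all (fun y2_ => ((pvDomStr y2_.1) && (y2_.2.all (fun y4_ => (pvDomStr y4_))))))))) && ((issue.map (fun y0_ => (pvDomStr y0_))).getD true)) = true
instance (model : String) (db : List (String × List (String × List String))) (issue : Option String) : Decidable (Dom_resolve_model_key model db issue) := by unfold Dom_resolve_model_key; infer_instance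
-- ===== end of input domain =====

-- B replaces A's staged scans and sorts by a one-time normalized-key index dict for the exact match and a single streaming argmin pass (two running bests, no candidate lists, no sort) for the prefix/issue selection (objective: alternative).


-- ===== PORT A =====
-- k.strip().lower()
def rmkNorm (s : String) : String := PySem.Str.lower (PySem.Str.strip s)

def rmkSYN : PySem.Dict String String := PySem.Dict.ofList
  [("lente", "lente-ricambio"), ("vetro", "lente-ricambio"), ("lenti", "lente-ricambio"),
   ("lens", "lente-ricambio"), ("nasello", "nasello"), ("nose", "nasello"),
   ("nosepad", "nasello"), ("terminali", "terminali"), ("terminal", "terminali"),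
   ("tips", "terminali"), ("kit-clip", "kit-clip"), ("clip", "kit-clip"),
   ("clip-in", "kit-clip"), ("inserto", "kit-clip")]

def canonicalize_issue (issue : Option String) : Option String :=
  match issue with
  | none => none
  | some s =>
    if s.isEmpty then none
    else
      let i := rmkNorm s
      some (rmkSYN.getD i i)

-- canonicalize_issue(issue.strip().lower()) or issue.strip().lower()   (truthiness 'or'; helper shared by both sources)
def rmkIssueKey (iss : String) : String :=
  let i := rmkNorm iss
  match canonicalize_issue (some i) with
  | some v => if v.isEmpty then i else v
  | none => i

def resolve_model_key (model : String) (db : List (String × List (String × List String))) (issue : Option String) : Option String :=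
  let d := PySem.Dict.ofList db
  if model.isEmpty || d.items.isEmpty then none
  else if d.contains model then some model
  else
    let m_low := rmkNorm model
    match d.keys.find? (fun k => rmkNorm k == m_low) with
    | some k => some k
    | none =>
      let candidates := d.keys.filter (fun k => PySem.Str.startswith (rmkNorm k) m_low)
      if candidates.isEmpty then none
      else
        match issue with
        | some iss =>
          if !iss.isEmpty then
            let issue_key := rmkIssueKey iss
            let issue_matches := candidates.filter (fun c => (d.getD c []).any (fun p => p.1 == issue_key))
            if issue_matches.length == 1 then issue_matches.head?
            else if issue_matches.length > 1 then (PySem.List.sorted issue_matches (fun s => s.length)).head?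
            else (PySem.List.sorted candidates (fun s => s.length)).head?
          else (PySem.List.sorted candidates (fun s => s.length)).head?
        | none => (PySem.List.sorted candidates (fun s => s.length)).head?

-- ===== PORT B =====
-- "if best is None or len(k) < len(best): best = k" (first-shortest running best)
def rmkBest (o : Option String) (k : String) : Option String :=
  match o with
  | none => some k
  | some m => if k.length < m.length then some k else some m

def resolve_model_key_alt (model : String) (db : List (String × List (String × List String))) (issue : Option String) : Option String :=
  let d := PySem.Dict.ofList db
  if model.isEmpty || d.items.isEmpty then none
  else if d.contains model then some model
  else
    let m_low := rmkNorm model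
    -- one-time normalized-key index (first occurrence wins)
    let norm_index := d.keys.foldl (fun (idx : PySem.Dict String String) k =>
        let kn := rmkNorm k
        if idx.contains kn then idx else idx.insert kn k) PySem.Dict.empty
    match norm_index.get? m_low with
    | some k => some k
    | none =>
      let issue_key : Option String :=
        match issue with
        | some iss => if !iss.isEmpty then some (rmkIssueKey iss) else none
        | none => none
      -- streaming argmin: two running bests, no lists, no sort
      let st := d.keys.foldl (fun (st : Option String × Option String) k =>
          if PySem.Str.startswith (rmkNorm k) m_low then
            (rmkBest st.1 k,
             if (match issue_key with
                 | some ik => (d.getD k []).any (fun p => p.1 == ik)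
                 | none => false) then rmkBest st.2 k
             else st.2)
          else st) (none, none)
      match st.2 with
      | some k => some k
      | none => st.1

-- ===== PRECONDITION & SPEC =====
def Spec_resolve_model_key (model : String) (db : List (String × List (String × List String))) (issue : Option String) (out : Option String) : Prop := out = resolve_model_key_alt model db issue
instance (model : String) (db : List (String × List (String × List String))) (issue : Option String) (out : Option String) : Decidable (Spec_resolve_model_key model db issue out) := by unfold Spec_resolve_model_key; infer_instance

-- ===== CLAIM (what is proved, stated in full; the proofs are below) =====
def Claim_equal_resolve_model_key : Prop := ∀ (model : String) (db : List (String × List (String × List String))) (issue : Option String), Dom_resolve_model_key model db issue → Spec_resolve_model_key model db issue (resolve_model_key model db issue)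

-- ===== LEMMAS AND PROOFS =====

-- B's first-wins normalized index looked up at t = A's find? over the keys
theorem rmk_idx_get? (t : String) :
    ∀ (ks : List String) (d0 : PySem.Dict String String),
      ((ks.foldl (fun (idx : PySem.Dict String String) k =>
          let kn := rmkNorm k
          if idx.contains kn then idx else idx.insert kn k) d0).get? t)
        = (d0.get? t).or (ks.find? (fun k => rmkNorm k == t)) := by
  intro ks
  induction ks with
  | nil => intro d0; simp
  | cons k tl ih =>
    intro d0
    simp only [List.foldl_cons, List.find?_cons]
    by_cases hc : d0.contains (rmkNorm k) = true
    · simp only [hc, if_true]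
      rw [ih]
      by_cases hp : (rmkNorm k == t) = true
      · have ht : t = rmkNorm k := (eq_of_beq hp).symm
        subst ht
        have : (d0.get? (rmkNorm k)).isSome := by
          rw [← PySem.Dict.contains_eq_isSome_get?]; exact hc
        obtain ⟨v, hv⟩ := Option.isSome_iff_exists.mp this
        simp [hp, hv]
      · simp [hp]
    · simp only [Bool.not_eq_true] at hc
      simp only [hc, Bool.false_eq_true, if_false]
      rw [ih]
      by_cases hp : (rmkNorm k == t) = true
      · have ht : t = rmkNorm k := (eq_of_beq hp).symm
        subst ht
        have h0 : d0.get? (rmkNorm k) = none := by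
          cases h : d0.get? (rmkNorm k) with
          | none => rfl
          | some v =>
            exfalso
            have : d0.contains (rmkNorm k) = (d0.get? (rmkNorm k)).isSome :=
              PySem.Dict.contains_eq_isSome_get? d0 (rmkNorm k)
            rw [h] at this; rw [this] at hc; simp at hc
        simp [hp, h0, PySem.Dict.get?_insert_self]
      · have hne : t ≠ rmkNorm k := fun h => hp (by simp [h])
        rw [PySem.Dict.get?_insert_of_ne d0 k hne]
        simp [hp]

-- B's streaming pass computes the running min-by-length of the two filtered key streams
theorem rmk_stream (P Q : String → Bool) :
    ∀ (ks : List String) (a b : Option String),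
      ks.foldl (fun (st : Option String × Option String) k =>
          if P k then (rmkBest st.1 k, if Q k then rmkBest st.2 k else st.2) else st) (a, b)
      = ((ks.filter P).foldl rmkBest a, (ks.filter (fun k => P k && Q k)).foldl rmkBest b) := by
  intro ks
  induction ks with
  | nil => intro a b; simp
  | cons k tl ih =>
    intro a b
    simp only [List.foldl_cons, List.filter_cons]
    cases hp : P k <;> cases hq : Q k <;> simp [hp, hq, ih]

-- B's streaming pass when no issue key is active: only the first best is maintained
theorem rmk_stream1 (P : String → Bool) :
    ∀ (ks : List String) (a b : Option String),
      ks.foldl (fun (st : Option String × Option String) k =>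
          if P k then (rmkBest st.1 k, st.2) else st) (a, b)
      = ((ks.filter P).foldl rmkBest a, b) := by
  intro ks
  induction ks with
  | nil => intro a b; simp
  | cons k tl ih =>
    intro a b
    simp only [List.foldl_cons, List.filter_cons]
    cases hp : P k <;> simp [hp, ih]

-- the min-by-length fold IS PySem's min? with key length
theorem rmk_minfold (xs : List String) :
    xs.foldl rmkBest none = PySem.List.min? xs (fun s => s.length) := by
  unfold PySem.List.min? rmkBest
  congr 1
  funext o k
  cases o <;> rfl

-- filter by a conjunction = the two staged filters of A
theorem rmk_filter_and (P Q : String → Bool) (l : List String) :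
    l.filter (fun k => P k && Q k) = (l.filter P).filter Q := by
  induction l with
  | nil => rfl
  | cons x t ih => cases hp : P x <;> cases hq : Q x <;> simp [hp, hq, ih]

-- head of the stable sort = first minimal element (Python min(…, key=len))
theorem rmk_min_cons2 (a b : String) (t : List String) :
    PySem.List.min? (a :: b :: t) (fun s => s.length)
      = PySem.List.min? ((if b.length < a.length then b else a) :: t) (fun s => s.length) := by
  simp only [PySem.List.min?, List.foldl_cons]
  by_cases h : b.length < a.length <;> simp [h]

theorem rmk_head_aux : ∀ (xs : List String) (m : String) (ys : List String),
    (xs.foldl (fun a x => PySem.List.insertBy (fun a b => decide (a.length < b.length)) x a) (m :: ys)).head?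
      = PySem.List.min? (m :: xs) (fun s => s.length) := by
  intro xs
  induction xs with
  | nil => intro m ys; rfl
  | cons x t ih =>
    intro m ys
    simp only [List.foldl_cons]
    rw [rmk_min_cons2 m x t]
    by_cases h : x.length < m.length
    · have e : PySem.List.insertBy (fun a b => decide (a.length < b.length)) x (m :: ys)
          = x :: m :: ys := by simp [PySem.List.insertBy, h]
      rw [e, if_pos h]
      exact ih x (m :: ys)
    · have e : PySem.List.insertBy (fun a b => decide (a.length < b.length)) x (m :: ys)
          = m :: PySem.List.insertBy (fun a b => decide (a.length < b.length)) x ys := by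
        simp [PySem.List.insertBy, h]
      rw [e, if_neg h]
      exact ih m _

theorem rmk_head_sorted (xs : List String) :
    (PySem.List.sorted xs (fun s => s.length)).head? = PySem.List.min? xs (fun s => s.length) := by
  cases xs with
  | nil => rfl
  | cons x t =>
    have h : PySem.List.sorted (x :: t) (fun s => s.length)
        = t.foldl (fun a y => PySem.List.insertBy (fun a b => decide (a.length < b.length)) y a) [x] := by
      simp [PySem.List.sorted, PySem.List.insertBy]
    rw [h]
    exact rmk_head_aux t x []

-- ===== VERDICT (by name: the statement is the Claim_ definition above) =====
theorem resolve_model_key_spec : Claim_equal_resolve_model_key := by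
  intro model db issue _
  unfold Spec_resolve_model_key resolve_model_key resolve_model_key_alt
  simp only []
  set d := PySem.Dict.ofList db with hd
  by_cases h1 : (model.isEmpty || d.items.isEmpty) = true
  · simp [h1]
  · simp only [Bool.not_eq_true] at h1
    simp only [h1, Bool.false_eq_true, if_false]
    by_cases h2 : d.contains model = true
    · simp [h2]
    · simp only [h2, Bool.false_eq_true, if_false]
      rw [rmk_idx_get? (rmkNorm model) d.keys PySem.Dict.empty]
      simp only [PySem.Dict.get?_empty, Option.none_or]
      cases hf : d.keys.find? (fun k => rmkNorm k == rmkNorm model) with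
      | some k => rfl
      | none =>
        simp only []
        cases issue with
        | none =>
          simp only []
          rw [rmk_stream]
          simp only [Bool.and_false, List.filter_false, List.foldl_nil]
          rw [rmk_minfold, rmk_head_sorted]
          set cands := d.keys.filter (fun k => PySem.Str.startswith (rmkNorm k) (rmkNorm model)) with hc
          by_cases hce : cands.isEmpty = true
          · have hnil : cands = [] := List.isEmpty_iff.mp hce
            simp [hce, hnil, PySem.List.min?]
          · simp [hce]
        | some iss =>
          simp only []
          by_cases hie : (!iss.isEmpty) = true
          · simp only [hie, if_true]
            rw [rmk_stream]
            rw [rmk_filter_and]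
            rw [rmk_minfold, rmk_minfold, rmk_head_sorted, rmk_head_sorted]
            set cands := d.keys.filter (fun k => PySem.Str.startswith (rmkNorm k) (rmkNorm model)) with hc
            set im := cands.filter (fun c => (d.getD c []).any (fun p => p.1 == rmkIssueKey iss)) with him
            by_cases hce : cands.isEmpty = true
            · have hnil : cands = [] := List.isEmpty_iff.mp hce
              have hin : im = [] := by rw [him, hnil]; rfl
              simp [hce, hnil, hin, PySem.List.min?]
            · cases hm : im with
              | nil => simp [hce, hm, PySem.List.min?]
              | cons c1 rest =>
                cases rest with
                | nil => simp [hce, hm, PySem.List.min?]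
                | cons c2 t =>
                  cases hmim : PySem.List.min? (c1 :: c2 :: t) (fun s => s.length) with
                  | none =>
                    exact absurd ((PySem.List.min?_eq_none_iff _ _).mp hmim) (by simp)
                  | some m => simp [hce, hm, hmim]
          · simp only [hie, Bool.false_eq_true, if_false]
            rw [rmk_stream1]
            rw [rmk_minfold, rmk_head_sorted]
            set cands := d.keys.filter (fun k => PySem.Str.startswith (rmkNorm k) (rmkNorm model)) with hc
            by_cases hce : cands.isEmpty = true
            · have hnil : cands = [] := List.isEmpty_iff.mp hce
              simp [hce, hnil, PySem.List.min?]
            · simp [hce]
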